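-- pv_equiv track=rewrite | github.com/BlasruizSantiago/MOVI | ETAPA1/main.py | topUsuariosMasGasto
-- ===== SOURCE A (Python) =====
-- def topUsuariosMasGasto(mTransporte, usrActivos, podio=3):
--     gastosTotales = [sum(mTransporte[i]) for i in range(len(usrActivos))]
--     # Selecciona los top_n usuarios con más gasto usando solo estructuras básicas
--     top_usuarios = []
--     gastos_copia = gastosTotales[:]
--     max_iter = min(podio, len(usrActivos))  # Asegura no exceder la cantidad de usuarios
--     for _ in range(max_iter):
--         max_gasto = max(gastos_copia)
--         idx = gastos_copia.index(max_gasto)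
--         top_usuarios.append(usrActivos[idx])
--         gastos_copia[idx] = float('-inf')  # Evita volver a elegir el mismo usuario
--     return top_usuarios
-- ===== SOURCE B (Python) =====
-- def topUsuariosMasGasto(mTransporte, usrActivos, podio=3):
--     n = len(usrActivos)
--     gastosTotales = [sum(mTransporte[i]) for i in range(n)]
--     order = sorted(range(n), key=lambda i: gastosTotales[i], reverse=True)
--     k = max(0, min(podio, n))
--     return [usrActivos[i] for i in order[:k]]
-- ===== Notes on version B (the rewrite author's own statement) =====
-- stated objective: alternative
-- what changed: Replaces A's repeated max/index/-inf-overwrite selection loop (O(n*k)) with a single stable descending sort of the index list by spend followed by a slice; the stable reverse sort preserves A's 'highest spend, lowest index first' tie-breaking.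
import Mathlib
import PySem

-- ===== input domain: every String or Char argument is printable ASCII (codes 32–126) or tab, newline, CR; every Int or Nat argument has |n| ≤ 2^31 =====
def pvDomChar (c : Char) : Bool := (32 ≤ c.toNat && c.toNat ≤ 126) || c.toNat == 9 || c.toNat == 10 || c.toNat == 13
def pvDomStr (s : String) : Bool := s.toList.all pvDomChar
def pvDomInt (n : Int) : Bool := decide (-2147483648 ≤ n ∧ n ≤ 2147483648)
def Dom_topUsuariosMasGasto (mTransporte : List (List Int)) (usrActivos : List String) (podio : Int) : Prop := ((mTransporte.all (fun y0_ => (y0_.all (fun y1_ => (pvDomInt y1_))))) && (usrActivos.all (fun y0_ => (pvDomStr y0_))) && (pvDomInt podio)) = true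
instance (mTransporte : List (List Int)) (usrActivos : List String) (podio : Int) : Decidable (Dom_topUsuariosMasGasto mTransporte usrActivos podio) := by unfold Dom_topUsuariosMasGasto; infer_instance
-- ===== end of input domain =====

-- B replaces A's repeated max/index/-inf-overwrite selection loop by a single stable
-- descending sort of the index list by spend followed by a slice (same tie order).

-- ===== PORT A =====
-- Python's `max` over gastos_copia, whose entries are ints or the float('-inf') sentinel:
-- the sentinel is modelled as `none` (below every `some`); exact here because -inf only
-- ever marks an already-taken slot and all real entries are ints.
def pvOptMax (a b : Option Int) : Option Int :=
  match a, b with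
  | none, b => b
  | some x, none => some x
  | some x, some y => some (max x y)

def topUsuariosMasGasto (mTransporte : List (List Int)) (usrActivos : List String) (podio : Int) : List String :=
  let gastosTotales := (PySem.List.pyRange 0 (usrActivos.length : Int) 1).map
      (fun i => (PySem.List.pyGetD mTransporte i []).sum)
  let maxIter := min podio (usrActivos.length : Int)
  let st := (PySem.List.pyRange 0 maxIter 1).foldl
      (fun (st : List (Option Int) × List String) _ =>
        let maxGasto := st.1.foldl pvOptMax none
        let idx := (PySem.List.index? st.1 maxGasto).getD 0
        (st.1.set idx none, st.2 ++ [PySem.List.pyGetD usrActivos (idx : Int) ""]))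
      (gastosTotales.map some, [])
  st.2

-- ===== PORT B =====
def topUsuariosMasGasto_alt (mTransporte : List (List Int)) (usrActivos : List String) (podio : Int) : List String :=
  let n := usrActivos.length
  let gastosTotales := (PySem.List.pyRange 0 (n : Int) 1).map
      (fun i => (PySem.List.pyGetD mTransporte i []).sum)
  let order := PySem.List.sorted (PySem.List.pyRange 0 (n : Int) 1)
      (fun i => PySem.List.pyGetD gastosTotales i 0) true
  let k := max 0 (min podio (n : Int))
  (PySem.List.slice order none (some k)).map (fun i => PySem.List.pyGetD usrActivos i "")

-- ===== PRECONDITION & SPEC =====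
-- Pre_ excludes exactly the inputs where Python A raises IndexError: fewer spending rows
-- than active users (A indexes mTransporte[i] for every i < len(usrActivos)).
def Pre_topUsuariosMasGasto (mTransporte : List (List Int)) (usrActivos : List String) (podio : Int) : Prop :=
  usrActivos.length ≤ mTransporte.length
instance (mTransporte : List (List Int)) (usrActivos : List String) (podio : Int) : Decidable (Pre_topUsuariosMasGasto mTransporte usrActivos podio) := by unfold Pre_topUsuariosMasGasto; infer_instance

def pvWitness_topUsuariosMasGasto : List (List Int) × List String × Int := ([[1, 2], [3]], ["a", "b"], 3)

def Spec_topUsuariosMasGasto (mTransporte : List (List Int)) (usrActivos : List String) (podio : Int) (out : List String) : Prop := out = topUsuariosMasGasto_alt mTransporte usrActivos podio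
instance (mTransporte : List (List Int)) (usrActivos : List String) (podio : Int) (out : List String) : Decidable (Spec_topUsuariosMasGasto mTransporte usrActivos podio out) := by unfold Spec_topUsuariosMasGasto; infer_instance

-- ===== CLAIM (what is proved, stated in full; the proofs are below) =====
def Claim_equal_topUsuariosMasGasto : Prop := ∀ (mTransporte : List (List Int)) (usrActivos : List String) (podio : Int), Dom_topUsuariosMasGasto mTransporte usrActivos podio → Pre_topUsuariosMasGasto mTransporte usrActivos podio → Spec_topUsuariosMasGasto mTransporte usrActivos podio (topUsuariosMasGasto mTransporte usrActivos podio)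

-- ===== LEMMAS AND PROOFS =====

def pvOrder (g : List Int) (n : Nat) : List Int :=
  PySem.List.sorted (PySem.List.pyRange 0 (n : Int) 1) (fun i => PySem.List.pyGetD g i 0) true
def pvKey (g : List Int) (i : Int) : Int := PySem.List.pyGetD g i 0
def pvS (g : List Int) (a b : Int) : Prop := pvKey g b < pvKey g a ∨ (pvKey g a = pvKey g b ∧ a < b)
def pvOLE : Option Int → Option Int → Prop
  | none, _ => True
  | some _, none => False
  | some x, some y => x ≤ y

theorem pvS_trans (g : List Int) {a b c : Int} (h1 : pvS g a b) (h2 : pvS g b c) : pvS g a c := by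
  unfold pvS at *
  rcases h1 with h1 | ⟨h1, h1'⟩ <;> rcases h2 with h2 | ⟨h2, h2'⟩
  · exact Or.inl (h2.trans h1)
  · exact Or.inl (h2 ▸ h1)
  · exact Or.inl (h1 ▸ h2)
  · exact Or.inr ⟨h1.trans h2, h1'.trans h2'⟩

theorem pvOLE_antisymm {a b : Option Int} (h1 : pvOLE a b) (h2 : pvOLE b a) : a = b := by
  cases a <;> cases b <;> simp_all [pvOLE]
  omega

theorem pvOptMax_choice (a b : Option Int) : pvOptMax a b = a ∨ pvOptMax a b = b := by
  cases a with
  | none => exact Or.inr rfl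
  | some x =>
    cases b with
    | none => exact Or.inl rfl
    | some y =>
      rcases max_choice x y with h | h
      · exact Or.inl (by simp [pvOptMax, h])
      · exact Or.inr (by simp [pvOptMax, h])

theorem pvOLE_left (a b : Option Int) : pvOLE a (pvOptMax a b) := by
  cases a <;> cases b <;> simp [pvOLE, pvOptMax]

theorem pvOLE_right (a b : Option Int) : pvOLE b (pvOptMax a b) := by
  cases a <;> cases b <;> simp [pvOLE, pvOptMax]

theorem pvFoldl_optMax_mem (l : List (Option Int)) : ∀ acc,
    l.foldl pvOptMax acc = acc ∨ l.foldl pvOptMax acc ∈ l := by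
  induction l with
  | nil => intro acc; exact Or.inl rfl
  | cons x t ih =>
    intro acc
    rcases ih (pvOptMax acc x) with h | h
    · rcases pvOptMax_choice acc x with h' | h'
      · exact Or.inl (by rw [List.foldl_cons, h, h'])
      · exact Or.inr (by rw [List.foldl_cons, h, h']; exact List.mem_cons_self ..)
    · exact Or.inr (by simp [List.foldl_cons]; right; exact h)

theorem pvFoldl_optMax_ub (l : List (Option Int)) : ∀ acc,
    pvOLE acc (l.foldl pvOptMax acc) ∧ ∀ v ∈ l, pvOLE v (l.foldl pvOptMax acc) := by
  induction l with
  | nil => intro acc; exact ⟨by cases acc <;> simp [pvOLE], by simp⟩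
  | cons x t ih =>
    intro acc
    obtain ⟨h1, h2⟩ := ih (pvOptMax acc x)
    have trans : ∀ {a b c : Option Int}, pvOLE a b → pvOLE b c → pvOLE a c := by
      intro a b c hab hbc; cases a <;> cases b <;> cases c <;> simp_all [pvOLE]; omega
    refine ⟨trans (pvOLE_left acc x) h1, ?_⟩
    intro v hv
    rcases List.mem_cons.mp hv with rfl | hv
    · exact trans (pvOLE_right acc v) h1
    · exact h2 v hv

theorem pvFoldl_optMax_eq_some (l : List (Option Int)) (M : Int)
    (hmem : some M ∈ l) (hub : ∀ v ∈ l, pvOLE v (some M)) :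
    l.foldl pvOptMax none = some M := by
  have h2 := (pvFoldl_optMax_ub l none).2 _ hmem
  rcases pvFoldl_optMax_mem l none with h | h
  · rw [h] at h2; exact absurd h2 (by simp [pvOLE])
  · exact pvOLE_antisymm (hub _ h) h2
theorem pvPairwise_insertBy {α : Type} (S : α → α → Prop)
    (htrans : ∀ {a b c : α}, S a b → S b c → S a c) (before : α → α → Bool) (x : α) :
    ∀ (acc : List α), acc.Pairwise S → (∀ y ∈ acc, if before x y then S x y else S y x) →
      (PySem.List.insertBy before x acc).Pairwise S := by
  intro acc
  induction acc with
  | nil => intro _ _; simp [PySem.List.insertBy]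
  | cons y ys ih =>
    intro hp hcond
    rw [List.pairwise_cons] at hp
    obtain ⟨hy, hys⟩ := hp
    by_cases hb : before x y = true
    · rw [show PySem.List.insertBy before x (y :: ys) = x :: y :: ys by
        simp [PySem.List.insertBy, hb]]
      have hxy : S x y := by have := hcond y (by simp); simpa [hb] using this
      refine List.Pairwise.cons ?_ (List.Pairwise.cons hy hys)
      intro z hz
      rcases List.mem_cons.mp hz with rfl | hz
      · exact hxy
      · exact htrans hxy (hy z hz)
    · rw [show PySem.List.insertBy before x (y :: ys) = y :: PySem.List.insertBy before x ys by
        simp [PySem.List.insertBy, hb]]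
      refine List.Pairwise.cons ?_ (ih hys (fun z hz => hcond z (by simp [hz])))
      intro z hz
      rcases (PySem.List.mem_insertBy before x z ys).mp hz with hzx | hz
      · subst hzx; have := hcond y (by simp); simpa [hb] using this
      · exact hy z hz

theorem pvOrder_pairwise (g : List Int) (n : Nat) : (pvOrder g n).Pairwise (pvS g) := by
  unfold pvOrder
  rw [PySem.List.sorted_rev_eq_foldl_insertBy]
  have main : ∀ (xs acc : List Int), xs.Pairwise (· < ·) → acc.Pairwise (pvS g) →
      (∀ x ∈ xs, ∀ y ∈ acc, y < x) →
      (xs.foldl (fun acc x => PySem.List.insertBy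
        (fun a b => decide ((fun i => PySem.List.pyGetD g i 0) b < (fun i => PySem.List.pyGetD g i 0) a)) x acc) acc).Pairwise (pvS g) := by
    intro xs
    induction xs with
    | nil => intro acc _ hacc _; simpa using hacc
    | cons x t iht =>
      intro acc hxs hacc hlt
      rw [List.pairwise_cons] at hxs
      rw [List.foldl_cons]
      apply iht _ hxs.2
      · apply pvPairwise_insertBy (pvS g) (fun h1 h2 => pvS_trans g h1 h2) _ x acc hacc
        intro y hy
        by_cases hk : pvKey g y < pvKey g x
        · simp only [pvKey] at hk; simp [hk]; exact Or.inl hk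
        · simp only [pvKey] at hk; simp [hk]
          rcases lt_or_eq_of_le (not_lt.mp hk) with h | h
          · exact Or.inl h
          · exact Or.inr ⟨h.symm, hlt x (by simp) y hy⟩
      · intro x' hx' y hy
        rcases (PySem.List.mem_insertBy _ x y acc).mp hy with rfl | hy
        · exact hxs.1 x' hx'
        · exact hlt x' (by simp [hx']) y hy
  refine main _ [] (PySem.List.pairwise_lt_pyRange_one 0 (n : Int)) (by simp) (by simp)
theorem pvIndex?_eq_some_of {α : Type} [BEq α] [LawfulBEq α] (xs : List α) (v : α) (k : Nat)
    (hk : k < xs.length) (hv : xs[k] = v) (hne : ∀ j (hj : j < k), xs[j]'(by omega) ≠ v) :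
    PySem.List.index? xs v = some k := by
  rw [PySem.List.index?_eq_some_iff]
  refine ⟨xs.take k, xs.drop (k + 1), ?_, ?_, ?_⟩
  · conv_lhs => rw [← List.take_append_drop k xs]
    rw [List.drop_eq_getElem_cons hk, hv]
  · simpa using le_of_lt hk
  · intro hmem
    obtain ⟨j, hj, hje⟩ := List.getElem_of_mem hmem
    rw [List.getElem_take] at hje
    have hjk : j < k := (by simpa using hj : j < k ∧ j < xs.length).1
    exact hne j hjk hje
def pvMask (g : List Int) (picked : List Int) : List (Option Int) :=
  (List.range g.length).map (fun (j : Nat) => if (j : Int) ∈ picked then none else some (pvKey g (j : Int)))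

theorem pvOrder_length (g : List Int) (n : Nat) : (pvOrder g n).length = n := by
  rw [pvOrder, PySem.List.length_sorted, PySem.List.length_pyRange_one]; omega

theorem pvOrder_mem (g : List Int) (n : Nat) {x : Int} : x ∈ pvOrder g n ↔ 0 ≤ x ∧ x < n := by
  rw [pvOrder, PySem.List.mem_sorted, PySem.List.mem_pyRange_one]

theorem pvOrder_nodup (g : List Int) (n : Nat) : (pvOrder g n).Nodup :=
  (PySem.List.sorted_perm _ _ _).nodup_iff.mpr (PySem.List.nodup_pyRange_one 0 (n : Int))

theorem pvMask_length (g : List Int) (p : List Int) : (pvMask g p).length = g.length := by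
  simp [pvMask]

theorem pvMask_getElem (g : List Int) (p : List Int) (j : Nat) (hj : j < g.length) :
    (pvMask g p)[j]'(by rw [pvMask_length]; omega) =
      if (j : Int) ∈ p then none else some (pvKey g (j : Int)) := by
  unfold pvMask
  rw [List.getElem_map, List.getElem_range]

theorem pvKey_nat (g : List Int) (j : Nat) (hj : j < g.length) : pvKey g (j : Int) = g[j] := by
  rw [pvKey, PySem.List.pyGetD_eq_getElem g 0 (by positivity) (by exact_mod_cast hj)]
  simp

theorem pvMask_nil (g : List Int) : pvMask g [] = g.map some := by
  apply List.ext_getElem (by simp [pvMask_length])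
  intro i h1 h2
  rw [pvMask_getElem g [] i (by simpa [pvMask_length] using h1)]
  simp [pvKey_nat g i (by simpa [pvMask_length] using h1)]

theorem pvA_step (g : List Int) (n t : Nat) (hg : g.length = n) (ht : t < n) (O : List Int)
    (hOlen : O.length = n) (hOmem : ∀ x : Int, x ∈ O ↔ 0 ≤ x ∧ x < n)
    (hnodup : O.Nodup) (hpair : O.Pairwise (pvS g)) :
    (pvMask g (O.take t)).foldl pvOptMax none
        = some (pvKey g (O[t]'(by omega))) ∧
    PySem.List.index? (pvMask g (O.take t)) (some (pvKey g (O[t]'(by omega))))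
        = some (O[t]'(by omega)).toNat ∧
    (pvMask g (O.take t)).set (O[t]'(by omega)).toNat none = pvMask g (O.take (t + 1)) := by
  have htO : t < O.length := by omega
  have hotmem : O[t]'htO ∈ O := List.getElem_mem htO
  have hotrange : 0 ≤ O[t]'htO ∧ O[t]'htO < n := (hOmem _).mp hotmem
  have hcast : (((O[t]'htO).toNat : Nat) : Int) = O[t]'htO := Int.toNat_of_nonneg hotrange.1
  have hotlt : (O[t]'htO).toNat < g.length := by omega
  have hdrop : O.drop t = O[t]'htO :: O.drop (t + 1) := List.drop_eq_getElem_cons htO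
  have hnotake : O[t]'htO ∉ O.take t := by
    intro hmem
    have h := hnodup
    rw [← List.take_append_drop t O, List.nodup_append] at h
    exact h.2.2 _ hmem _ (by rw [hdrop]; exact List.mem_cons_self ..) rfl
  have hpairdrop : (O.drop t).Pairwise (pvS g) := hpair.sublist (List.drop_sublist t O)
  have hlater : ∀ j ∈ O.drop (t + 1), pvS g (O[t]'htO) j := by
    rw [hdrop, List.pairwise_cons] at hpairdrop; exact hpairdrop.1
  have hunpicked : ∀ j : Nat, j < n → (j : Int) ∉ O.take t →
      (j : Int) = O[t]'htO ∨ (j : Int) ∈ O.drop (t + 1) := by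
    intro j hj hnot
    have hjO : (j : Int) ∈ O := (hOmem _).mpr ⟨by positivity, by exact_mod_cast hj⟩
    rw [← List.take_append_drop t O, List.mem_append] at hjO
    rcases hjO with h | h
    · exact absurd h hnot
    · rw [hdrop] at h; exact List.mem_cons.mp h
  have hkey_le : ∀ j : Nat, j < n → (j : Int) ∉ O.take t → pvKey g (j : Int) ≤ pvKey g (O[t]'htO) := by
    intro j hj hnot
    rcases hunpicked j hj hnot with h | h
    · rw [h]
    · rcases hlater _ h with h' | ⟨h', _⟩
      · exact le_of_lt h'
      · exact le_of_eq h'.symm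
  have hmaskot : (pvMask g (O.take t))[(O[t]'htO).toNat]'(by rw [pvMask_length]; omega)
      = some (pvKey g (O[t]'htO)) := by
    rw [pvMask_getElem g _ _ hotlt, hcast, if_neg hnotake]
  refine ⟨?_, ?_, ?_⟩
  · apply pvFoldl_optMax_eq_some
    · rw [← hmaskot]; exact List.getElem_mem _
    · intro v hv
      rw [pvMask] at hv
      obtain ⟨j, hj, rfl⟩ := List.mem_map.mp hv
      have hjlt : j < n := by rw [List.mem_range] at hj; omega
      by_cases hcase : (j : Int) ∈ O.take t
      · rw [if_pos hcase]; exact trivial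
      · rw [if_neg hcase]
        simpa [pvOLE] using hkey_le j hjlt hcase
  · apply pvIndex?_eq_some_of _ _ _ (by rw [pvMask_length]; omega) hmaskot
    intro j hjlt
    rw [pvMask_getElem g _ j (by omega)]
    by_cases hcase : (j : Int) ∈ O.take t
    · simp [hcase]
    · rw [if_neg hcase]
      intro heq
      have hkeyeq : pvKey g (j : Int) = pvKey g (O[t]'htO) := by injection heq
      have hjn : j < n := by omega
      rcases hunpicked j hjn hcase with h | h
      · omega
      · rcases hlater _ h with h' | ⟨h', h''⟩
        · omega
        · omega
  · have htake1 : O.take (t + 1) = O.take t ++ [O[t]'htO] := by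
      rw [List.take_add_one, List.getElem?_eq_getElem htO]
      rfl
    apply List.ext_getElem (by simp [pvMask_length])
    intro i h1 h2
    have hi : i < g.length := by
      rw [List.length_set, pvMask_length] at h1; exact h1
    rw [List.getElem_set, pvMask_getElem g _ i hi, pvMask_getElem g _ i hi]
    by_cases hio : i = (O[t]'htO).toNat
    · subst hio
      have hmem1 : O[t]'htO ∈ O.take (t + 1) := by
        rw [htake1]; exact List.mem_append_right _ (by simp)
      rw [if_pos rfl, if_pos (by rw [hcast]; exact hmem1)]
    · have hne : ¬ ((i : Int) = O[t]'htO) := by omega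
      rw [if_neg (fun h => hio h.symm)]
      have hiff : ((i : Int) ∈ O.take (t + 1)) ↔ ((i : Int) ∈ O.take t) := by
        rw [htake1, List.mem_append]
        simp [hne]
      exact if_congr hiff.symm rfl rfl

theorem pvA_inv (g : List Int) (usr : List String) (n : Nat) (hg : g.length = n) :
    ∀ t : Nat, t ≤ n →
      (PySem.List.pyRange 0 (t : Int) 1).foldl
        (fun (st : List (Option Int) × List String) _ =>
          let maxGasto := st.1.foldl pvOptMax none
          let idx := (PySem.List.index? st.1 maxGasto).getD 0
          (st.1.set idx none, st.2 ++ [PySem.List.pyGetD usr (idx : Int) ""]))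
        (g.map some, []) =
      (pvMask g ((pvOrder g n).take t),
       ((pvOrder g n).take t).map (fun i => PySem.List.pyGetD usr i "")) := by
  intro t
  induction t with
  | zero =>
    intro _
    rw [show ((0 : Nat) : Int) = 0 by simp, PySem.List.pyRange_one_eq_nil le_rfl]
    simp [pvMask_nil]
  | succ t ih =>
    intro ht
    have hcast : ((t + 1 : Nat) : Int) = (t : Int) + 1 := by push_cast; ring
    rw [hcast, PySem.List.pyRange_one_succ_right (by positivity), List.foldl_append, ih (by omega)]
    obtain ⟨hmax, hidx, hset⟩ := pvA_step g n t hg (by omega) (pvOrder g n)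
      (pvOrder_length g n) (fun x => pvOrder_mem g n) (pvOrder_nodup g n) (pvOrder_pairwise g n)
    have htO : t < (pvOrder g n).length := by rw [pvOrder_length]; omega
    have hotnn : 0 ≤ (pvOrder g n)[t]'htO :=
      ((pvOrder_mem g n).mp (List.getElem_mem htO)).1
    have htake1 : (pvOrder g n).take (t + 1)
        = (pvOrder g n).take t ++ [(pvOrder g n)[t]'htO] := by
      rw [List.take_add_one, List.getElem?_eq_getElem htO]; rfl
    simp only [List.foldl_cons, List.foldl_nil]
    rw [hmax, hidx]
    simp only [Option.getD_some]
    rw [hset, htake1, List.map_append]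
    rw [Int.toNat_of_nonneg hotnn]
    simp


theorem pvMain (mT : List (List Int)) (usr : List String) (podio : Int) :
    topUsuariosMasGasto mT usr podio = topUsuariosMasGasto_alt mT usr podio := by
  simp only [topUsuariosMasGasto, topUsuariosMasGasto_alt]
  set g := (PySem.List.pyRange 0 (usr.length : Int) 1).map
      (fun i => (PySem.List.pyGetD mT i []).sum) with hgdef
  have hg : g.length = usr.length := by
    rw [hgdef, List.length_map, PySem.List.length_pyRange_one]; omega
  by_cases hq : min podio (usr.length : Int) ≤ 0
  · rw [PySem.List.pyRange_one_eq_nil hq]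
    rw [max_eq_left hq, PySem.List.slice_to _ le_rfl]
    simp
  · rw [not_le] at hq
    have h0 : 0 ≤ min podio (usr.length : Int) := le_of_lt hq
    have hcast : (((min podio (usr.length : Int)).toNat : Nat) : Int)
        = min podio (usr.length : Int) := Int.toNat_of_nonneg h0
    have htle : (min podio (usr.length : Int)).toNat ≤ usr.length := by
      have := min_le_right podio (usr.length : Int); omega
    rw [max_eq_right h0, PySem.List.slice_to _ h0]
    rw [← hcast]
    rw [pvA_inv g usr usr.length hg _ htle]
    rfl

-- ===== VERDICT (by name: the statement is the Claim_ definition above) =====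
theorem topUsuariosMasGasto_spec : Claim_equal_topUsuariosMasGasto := by
  intro mT usr podio _ _
  exact pvMain mT usr podio
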